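-- pv_equiv track=rewrite | github.com/poxxus/Palindromos | PI/visita_aleatoria.py | percorrer
-- ===== SOURCE A (Python) =====
-- def percorrer(matriz, lista) -> bool:
--     for i in range(0, len(matriz)):
--         for j in range(0, len(matriz[0])):
--             if matriz[i][j] in lista:
--                 elemento = matriz[i][j]
--                 lista.remove(elemento)
--     if len(lista) == 0:
--         return True
--     return False
-- ===== SOURCE B (Python) =====
-- def percorrer(matriz, lista) -> bool:
--     counts = {}
--     for i in range(len(matriz)):
--         for j in range(len(matriz[0])):
--             v = matriz[i][j]
--             counts[v] = counts.get(v, 0) + 1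
--     remaining = []
--     for x in lista:
--         if counts.get(x, 0) > 0:
--             counts[x] = counts[x] - 1
--         else:
--             remaining.append(x)
--     lista[:] = remaining
--     return len(lista) == 0
-- ===== Notes on version B (the rewrite author's own statement) =====
-- stated objective: faster
-- what changed: Instead of scanning the matrix and doing an O(len(lista)) membership test plus list.remove per cell, B builds a count table of the matrix cells once and then makes a single pass over lista, decrementing counts and collecting unmatched elements.
import Mathlib
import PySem

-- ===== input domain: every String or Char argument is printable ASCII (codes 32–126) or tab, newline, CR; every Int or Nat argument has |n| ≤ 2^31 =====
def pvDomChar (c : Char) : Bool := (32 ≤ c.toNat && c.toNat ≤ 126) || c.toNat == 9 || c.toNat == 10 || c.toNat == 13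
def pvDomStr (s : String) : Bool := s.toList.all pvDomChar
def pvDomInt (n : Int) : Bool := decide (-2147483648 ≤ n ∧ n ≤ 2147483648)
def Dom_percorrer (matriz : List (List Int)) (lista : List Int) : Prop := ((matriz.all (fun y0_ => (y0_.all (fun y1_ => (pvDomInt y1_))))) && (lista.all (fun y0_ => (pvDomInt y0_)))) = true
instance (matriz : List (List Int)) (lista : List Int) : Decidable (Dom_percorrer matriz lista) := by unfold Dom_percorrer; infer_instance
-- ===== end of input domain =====

-- B replaces A's per-cell membership-test + list.remove scan of lista by a count table of
-- the matrix cells plus one pass over lista (measurably faster). Both Pythons mutate `lista`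
-- in place identically; the theorems here are about the RETURN value only.

-- ===== PORT A =====
-- Indexing matriz[i] (i < len) and matriz[i][j] (j < len(matriz[0]) ≤ len(matriz[i]) under
-- Pre_) is always in range inside Pre_, so `getD` with an unused default is exact there.
def percorrer (matriz : List (List Int)) (lista : List Int) : Bool :=
  let final := (List.range matriz.length).foldl (fun acc i =>
      (List.range (matriz.headD []).length).foldl (fun acc2 j =>
        let v := (matriz.getD i []).getD j 0
        if v ∈ acc2 then ((PySem.List.remove? acc2 v).getD acc2) else acc2) acc) lista
  final.length == 0

-- ===== PORT B =====
def percorrer_alt (matriz : List (List Int)) (lista : List Int) : Bool :=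
  let counts : PySem.Dict Int Int := (List.range matriz.length).foldl (fun d i =>
      (List.range (matriz.headD []).length).foldl (fun d2 j =>
        let v := (matriz.getD i []).getD j 0
        d2.insert v (d2.getD v 0 + 1)) d) PySem.Dict.empty
  let res := lista.foldl (fun (s : PySem.Dict Int Int × List Int) x =>
      if s.1.getD x 0 > 0 then (s.1.insert x (s.1.getD x 0 - 1), s.2)
      else (s.1, s.2 ++ [x])) (counts, [])
  res.2.length == 0

-- ===== PRECONDITION & SPEC =====
-- Pre_ excludes exactly the ragged matrices with a row shorter than row 0, on which A's
-- `matriz[i][j]` raises IndexError (B raises on the same inputs).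
def Pre_percorrer (matriz : List (List Int)) (lista : List Int) : Prop :=
  ∀ row ∈ matriz, (matriz.headD []).length ≤ row.length
instance (matriz : List (List Int)) (lista : List Int) : Decidable (Pre_percorrer matriz lista) := by unfold Pre_percorrer; infer_instance
def pvWitness_percorrer : List (List Int) × List Int := ([[1, 2], [2, 3]], [2, 2, 1])

def Spec_percorrer (matriz : List (List Int)) (lista : List Int) (out : Bool) : Prop := out = percorrer_alt matriz lista
instance (matriz : List (List Int)) (lista : List Int) (out : Bool) : Decidable (Spec_percorrer matriz lista out) := by unfold Spec_percorrer; infer_instance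

-- ===== CLAIM (what is proved, stated in full; the proofs are below) =====
def Claim_equal_percorrer : Prop := ∀ (matriz : List (List Int)) (lista : List Int), Dom_percorrer matriz lista → Pre_percorrer matriz lista → Spec_percorrer matriz lista (percorrer matriz lista)

-- ===== LEMMAS AND PROOFS =====

-- the matrix cells actually visited, in visit order
def pvCells (matriz : List (List Int)) : List Int :=
  matriz.flatMap (fun row => row.take (matriz.headD []).length)

-- fold over range-of-indices = fold over the list itself
theorem pv_foldl_range_getD {β : Type} (g : β → List Int → β) (l : List (List Int))
    (init : β) :
    (List.range l.length).foldl (fun acc i => g acc (l.getD i [])) init = l.foldl g init := by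
  induction l generalizing init with
  | nil => simp
  | cons x t ih =>
      simp only [List.length_cons, List.range_succ_eq_map, List.foldl_cons, List.foldl_map]
      simpa using ih (init := g init x)

-- inner fold over range of column indices = fold over the row's prefix
theorem pv_foldl_range_row {β : Type} (f : β → Int → β) (row : List Int) (n : Nat)
    (h : n ≤ row.length) (init : β) :
    (List.range n).foldl (fun acc j => f acc (row.getD j 0)) init
      = (row.take n).foldl f init := by
  induction n generalizing init with
  | zero => simp
  | succ m ih =>
      have hm : m ≤ row.length := Nat.le_of_succ_le h
      have hmlt : m < row.length := h
      rw [List.range_succ, List.foldl_append, ih hm,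
        List.take_add_one, List.foldl_append]
      simp [List.getD, List.getElem?_eq_getElem hmlt]

-- the whole nested index loop is a fold over pvCells
theorem pv_nested_eq_cells {β : Type} (f : β → Int → β) (matriz : List (List Int))
    (hPre : ∀ row ∈ matriz, (matriz.headD []).length ≤ row.length) (init : β) :
    (List.range matriz.length).foldl (fun acc i =>
        (List.range (matriz.headD []).length).foldl (fun acc2 j =>
          f acc2 ((matriz.getD i []).getD j 0)) acc) init
      = (pvCells matriz).foldl f init := by
  rw [pv_foldl_range_getD (g := fun acc row =>
      (List.range (matriz.headD []).length).foldl (fun acc2 j => f acc2 (row.getD j 0)) acc)]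
  rw [pvCells, List.flatMap, List.foldl_flatten, List.foldl_map]
  exact PySem.List.foldl_congr_mem _ _ _ _ (fun acc row hrow => pv_foldl_range_row f row _ (hPre row hrow) acc)

-- A's step is just List.erase
theorem pv_stepA_eq_erase (l : List Int) (v : Int) :
    (if v ∈ l then ((PySem.List.remove? l v).getD l) else l) = l.erase v := by
  by_cases h : v ∈ l
  · simp [h, PySem.List.remove?_eq_some_erase l v h]
  · simp [h, List.erase_of_not_mem h]

-- A's fold empties lista iff every multiplicity in lista is covered by the cells
theorem pv_erase_fold_nil_iff (cells lista : List Int) :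
    (cells.foldl (fun l c => l.erase c) lista = []) ↔
      ∀ v, lista.count v ≤ cells.count v := by
  induction cells generalizing lista with
  | nil =>
      simp only [List.foldl_nil, List.count_nil, Nat.le_zero]
      constructor
      · rintro rfl v; simp
      · intro h
        rcases lista with _ | ⟨x, t⟩
        · rfl
        · exact absurd (h x) (by simp [List.count_cons_self])
  | cons c cs ih =>
      simp only [List.foldl_cons, ih]
      constructor
      · intro h v
        by_cases hv : v = c
        · subst hv
          have := h v
          rw [List.count_erase_self] at this
          simp only [List.count_cons_self]
          omega
        · have := h v
          rw [List.count_erase_of_ne hv] at this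
          simpa [List.count_cons_of_ne (Ne.symm hv)] using this
      · intro h v
        by_cases hv : v = c
        · subst hv
          have := h v
          rw [List.count_erase_self]
          simp only [List.count_cons_self] at this
          omega
        · have := h v
          rw [List.count_erase_of_ne hv]
          simpa [List.count_cons_of_ne (Ne.symm hv)] using this

-- B's consuming pass only ever appends to its output accumulator
theorem pv_pass_prefix (lista : List Int) (d : PySem.Dict Int Int) (acc : List Int) :
    ∃ t, (lista.foldl (fun (s : PySem.Dict Int Int × List Int) x =>
        if s.1.getD x 0 > 0 then (s.1.insert x (s.1.getD x 0 - 1), s.2)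
        else (s.1, s.2 ++ [x])) (d, acc)).2 = acc ++ t := by
  induction lista generalizing d acc with
  | nil => exact ⟨[], by simp⟩
  | cons x xs ih =>
      simp only [List.foldl_cons]
      by_cases h : d.getD x 0 > 0
      · simp only [h, if_pos]
        exact ih _ acc
      · simp only [h, ite_false]
        obtain ⟨t, ht⟩ := ih d (acc ++ [x])
        exact ⟨x :: t, by simpa using ht⟩

-- B's consuming pass yields an empty remainder iff the table covers lista's multiplicities
theorem pv_pass_nil_iff (lista : List Int) (d : PySem.Dict Int Int) :
    ((lista.foldl (fun (s : PySem.Dict Int Int × List Int) x =>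
        if s.1.getD x 0 > 0 then (s.1.insert x (s.1.getD x 0 - 1), s.2)
        else (s.1, s.2 ++ [x])) (d, [])).2 = []) ↔
      ∀ v ∈ lista, (lista.count v : Int) ≤ d.getD v 0 := by
  induction lista generalizing d with
  | nil => simp
  | cons x xs ih =>
      simp only [List.foldl_cons]
      by_cases h : d.getD x 0 > 0
      · simp only [h, if_pos]
        rw [ih]
        constructor
        · intro hcov v hv
          by_cases hvx : v = x
          · subst hvx
            by_cases hmem : v ∈ xs
            · have := hcov v hmem
              rw [PySem.Dict.getD_insert_self] at this
              simp only [List.count_cons_self]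
              push_cast
              omega
            · simp [List.count_eq_zero_of_not_mem hmem, List.count_cons_self]
              omega
          · have hmem : v ∈ xs := by
              rcases List.mem_cons.mp hv with h' | h'
              · exact absurd h' hvx
              · exact h'
            have := hcov v hmem
            rw [PySem.Dict.getD_insert_of_ne _ _ _ hvx] at this
            simpa [List.count_cons_of_ne (Ne.symm hvx)] using this
        · intro hcov v hv
          by_cases hvx : v = x
          · subst hvx
            have := hcov v (List.mem_cons_self)
            rw [PySem.Dict.getD_insert_self]
            simp only [List.count_cons_self] at this
            push_cast at this ⊢
            omega
          · have := hcov v (List.mem_cons_of_mem _ hv)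
            rw [PySem.Dict.getD_insert_of_ne _ _ _ hvx]
            simpa [List.count_cons_of_ne (Ne.symm hvx)] using this
      · simp only [h, ite_false]
        constructor
        · intro hnil
          obtain ⟨t, ht⟩ := pv_pass_prefix xs d [x]
          simp only [List.nil_append] at hnil
          rw [ht] at hnil
          simp at hnil
        · intro hcov
          have := hcov x List.mem_cons_self
          simp only [List.count_cons_self] at this
          have hc : (0 : Int) ≤ (xs.count x : Int) := Int.natCast_nonneg _
          push_cast at this
          omega

-- ===== VERDICT (by name: the statement is the Claim_ definition above) =====
theorem percorrer_spec : Claim_equal_percorrer := by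
  intro matriz lista _ hPre
  unfold Spec_percorrer percorrer percorrer_alt
  simp only []
  rw [pv_nested_eq_cells (f := fun (l : List Int) v =>
        if v ∈ l then ((PySem.List.remove? l v).getD l) else l) matriz hPre lista,
      pv_nested_eq_cells (f := fun (d : PySem.Dict Int Int) v =>
        d.insert v (d.getD v 0 + 1)) matriz hPre PySem.Dict.empty]
  rw [show ((pvCells matriz).foldl (fun l c => if c ∈ l then ((PySem.List.remove? l c).getD l) else l) lista)
      = ((pvCells matriz).foldl (fun l c => l.erase c) lista) from
    PySem.List.foldl_congr_mem _ _ _ _ (fun acc x _ => pv_stepA_eq_erase acc x)]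
  have hcnt : ∀ v : Int,
      ((pvCells matriz).foldl (fun (d : PySem.Dict Int Int) v => d.insert v (d.getD v 0 + 1)) PySem.Dict.empty).getD v 0
        = ((pvCells matriz).count v : Int) := by
    intro v
    rw [PySem.Dict.getD_foldl_insert_add_one]
    simp [PySem.Dict.getD, PySem.Dict.get?, PySem.Dict.empty]
  apply Bool.eq_iff_iff.mpr
  simp only [beq_iff_eq, List.length_eq_zero_iff]
  rw [pv_erase_fold_nil_iff, pv_pass_nil_iff]
  constructor
  · intro hc v _
    rw [hcnt v]
    exact_mod_cast hc v
  · intro hc v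
    by_cases hv : v ∈ lista
    · have := hc v hv
      rw [hcnt v] at this
      exact_mod_cast this
    · simp [List.count_eq_zero_of_not_mem hv]
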